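-- pv_equiv track=rewrite | github.com/hding49/lcPractice | affirm/phone screen/sum-of-island-max.py | sum_of_islands_max
-- ===== SOURCE A (Python) =====
-- from collections import deque
-- from typing import List
--
-- def sum_of_islands_max(grid: List[List[int]]) -> int:
--     """
--     Return the sum of the maximum value from each island in the grid.
--     An island is 4-connected (up/down/left/right) and consists of cells > 0.
--
--     Args:
--         grid: m x n list of lists with non-negative integers
--
--     Returns:
--         Sum of per-island maxima
--     """
--     if not grid or not grid[0]:
--         return 0
--
--     m, n = len(grid), len(grid[0])
--     visited = [[False] * n for _ in range(m)]
--     ans = 0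
--
--     def bfs(sr: int, sc: int) -> int:
--         """BFS the island starting at (sr, sc), return the island's max value."""
--         q = deque([(sr, sc)])
--         visited[sr][sc] = True
--         island_max = grid[sr][sc]
--         while q:
--             r, c = q.popleft()
--             val = grid[r][c]
--             if val > island_max:
--                 island_max = val
--             # 4 neighbors
--             if r > 0 and grid[r-1][c] > 0 and not visited[r-1][c]:
--                 visited[r-1][c] = True
--                 q.append((r-1, c))
--             if r+1 < m and grid[r+1][c] > 0 and not visited[r+1][c]:
--                 visited[r+1][c] = True
--                 q.append((r+1, c))
--             if c > 0 and grid[r][c-1] > 0 and not visited[r][c-1]: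
--                 visited[r][c-1] = True
--                 q.append((r, c-1))
--             if c+1 < n and grid[r][c+1] > 0 and not visited[r][c+1]:
--                 visited[r][c+1] = True
--                 q.append((r, c+1))
--         return island_max
--
--     for i in range(m):
--         for j in range(n):
--             if grid[i][j] > 0 and not visited[i][j]:
--                 ans += bfs(i, j)
--
--     return ans
-- ===== SOURCE B (Python) =====
-- def sum_of_islands_max(grid):
--     """
--     Return the sum of the maximum value from each island in the grid.
--     An island is 4-connected (up/down/left/right) and consists of cells > 0.
--     Union-find over flattened cell indices instead of BFS flood fill.
--     """
--     if not grid or not grid[0]: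
--         return 0
--
--     m, n = len(grid), len(grid[0])
--     parent = list(range(m * n))
--
--     def find(x):
--         while parent[x] != x:
--             x = parent[x]
--         return x
--
--     def union(a, b):
--         ra, rb = find(a), find(b)
--         if ra != rb:
--             if ra < rb:
--                 parent[rb] = ra
--             else:
--                 parent[ra] = rb
--
--     for r in range(m):
--         for c in range(n):
--             if grid[r][c] > 0:
--                 if r + 1 < m and grid[r + 1][c] > 0:
--                     union(r * n + c, (r + 1) * n + c)
--                 if c + 1 < n and grid[r][c + 1] > 0:
--                     union(r * n + c, r * n + c + 1)
--
--     best = [0] * (m * n)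
--     for r in range(m):
--         for c in range(n):
--             v = grid[r][c]
--             if v > 0:
--                 rt = find(r * n + c)
--                 best[rt] = max(best[rt], v)
--     return sum(best)
-- ===== Notes on version B (the rewrite author's own statement) =====
-- stated objective: alternative
-- what changed: Replaces the BFS flood-fill with a shared visited matrix by a disjoint-set (union-find, min-index root) over flattened cell indices: one pass unions each positive cell with its positive right/down neighbour, a second pass tallies per-root maxima into a flat array and sums it.
import Mathlib
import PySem

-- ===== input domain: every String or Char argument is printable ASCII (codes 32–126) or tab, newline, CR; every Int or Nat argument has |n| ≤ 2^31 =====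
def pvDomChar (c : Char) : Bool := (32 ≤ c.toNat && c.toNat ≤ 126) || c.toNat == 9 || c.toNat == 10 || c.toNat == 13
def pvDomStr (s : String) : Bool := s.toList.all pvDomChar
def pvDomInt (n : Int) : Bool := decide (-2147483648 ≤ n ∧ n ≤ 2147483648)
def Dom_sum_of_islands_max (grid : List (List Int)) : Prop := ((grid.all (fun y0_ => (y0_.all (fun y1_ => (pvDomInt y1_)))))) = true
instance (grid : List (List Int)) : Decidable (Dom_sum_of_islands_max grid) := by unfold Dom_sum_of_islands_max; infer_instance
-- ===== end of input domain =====

-- B replaces A's BFS flood fill by a disjoint-set (union-find with min-index roots) over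
-- flattened cell indices; objective: a genuinely different algorithm of similar cost.

-- ===== PORT A =====
-- grid[r][c] on indices that are in bounds on every admitted input (getD default never read there)
def cellv (g : List (List Int)) (r c : Nat) : Int := (g.getD r []).getD c 0

-- visited[r][c]; out-of-range reads as `true` (A only ever reads in-range cells, where this is exact)
def vget (v : List (List Bool)) (r c : Nat) : Bool := (v.getD r []).getD c true

-- visited[r][c] = True
def vset (v : List (List Bool)) (r c : Nat) : List (List Bool) := v.set r ((v.getD r []).set c true)

def countFalse (v : List (List Bool)) : Nat := (v.map (fun row => row.count false)).sum

lemma count_set_true (row : List Bool) (c : Nat) (h : row.getD c true = false) :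
    (row.set c true).count false + 1 = row.count false := by
  induction row generalizing c with
  | nil => simp at h
  | cons hd tl ih =>
    cases c with
    | zero => simp_all
    | succ c =>
      simp only [List.getD_cons_succ] at h
      have := ih c h
      simp only [List.set_cons_succ, List.count_cons]
      split <;> omega

lemma countFalse_vset (v : List (List Bool)) (r c : Nat) (h : vget v r c = false) :
    countFalse (vset v r c) + 1 = countFalse v := by
  induction v generalizing r with
  | nil => simp [vget] at h
  | cons hd tl ih =>
    cases r with
    | zero =>
      simp only [vget, List.getD_cons_zero] at h
      have := count_set_true hd c h
      simp only [vset, List.getD_cons_zero, List.set_cons_zero, countFalse, List.map_cons,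
        List.sum_cons]
      omega
    | succ r =>
      simp only [vget, List.getD_cons_succ] at h
      have := ih r h
      simp only [vset, List.getD_cons_succ, List.set] at *
      simp [countFalse] at this ⊢
      omega

-- one `if in-bounds and grid[..] > 0 and not visited[..]: mark and append` step of A's bfs
def tryPush (g : List (List Int)) (st : List (List Bool) × List (Nat × Nat)) (ok : Bool)
    (r c : Nat) : List (List Bool) × List (Nat × Nat) :=
  if ok && decide (0 < cellv g r c) && !vget st.1 r c then
    (vset st.1 r c, st.2 ++ [(r, c)])
  else st

lemma tryPush_measure (g : List (List Int)) (st : List (List Bool) × List (Nat × Nat))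
    (ok : Bool) (r c : Nat) :
    5 * countFalse (tryPush g st ok r c).1 + (tryPush g st ok r c).2.length ≤
      5 * countFalse st.1 + st.2.length := by
  unfold tryPush
  split
  · next h =>
    simp only [Bool.and_eq_true, Bool.not_eq_true'] at h
    have := countFalse_vset st.1 r c h.2
    simp [List.length_append]
    omega
  · exact le_refl _

-- the `while q:` loop of A's bfs (deque: pop from the front, append at the back)
def bfsLoop (g : List (List Int)) (m n : Nat) (visited : List (List Bool))
    (q : List (Nat × Nat)) (im : Int) : List (List Bool) × Int :=
  match q with
  | [] => (visited, im)
  | (r, c) :: qs =>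
    let val := cellv g r c
    let im' := if im < val then val else im
    let st1 := tryPush g (visited, qs) (decide (0 < r)) (r - 1) c
    let st2 := tryPush g st1 (decide (r + 1 < m)) (r + 1) c
    let st3 := tryPush g st2 (decide (0 < c)) r (c - 1)
    let st4 := tryPush g st3 (decide (c + 1 < n)) r (c + 1)
    bfsLoop g m n st4.1 st4.2 im'
termination_by 5 * countFalse visited + q.length
decreasing_by
  calc 5 * countFalse (tryPush g (tryPush g (tryPush g (tryPush g (visited, qs) (decide (0 < r)) (r - 1) c) (decide (r + 1 < m)) (r + 1) c) (decide (0 < c)) r (c - 1)) (decide (c + 1 < n)) r (c + 1)).1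
        + (tryPush g (tryPush g (tryPush g (tryPush g (visited, qs) (decide (0 < r)) (r - 1) c) (decide (r + 1 < m)) (r + 1) c) (decide (0 < c)) r (c - 1)) (decide (c + 1 < n)) r (c + 1)).2.length
      ≤ _ := tryPush_measure _ _ _ _ _
    _ ≤ _ := tryPush_measure _ _ _ _ _
    _ ≤ _ := tryPush_measure _ _ _ _ _
    _ ≤ 5 * countFalse visited + qs.length := tryPush_measure _ _ _ _ _
    _ < 5 * countFalse visited + ((r, c) :: qs).length := by simp

def sum_of_islands_max (grid : List (List Int)) : Int :=
  if grid.isEmpty || (grid.headD []).isEmpty then 0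
  else
    let m := grid.length
    let n := (grid.headD []).length
    (((List.range m).foldl (fun st i => (List.range n).foldl (fun (st : List (List Bool) × Int) j =>
        if 0 < cellv grid i j ∧ vget st.1 i j = false then
          let res := bfsLoop grid m n (vset st.1 i j) [(i, j)] (cellv grid i j)
          (res.1, st.2 + res.2)
        else st) st)
      (List.replicate m (List.replicate n false), 0))).2

-- ===== PORT B =====
-- `while parent[x] != x: x = parent[x]` ; guard `< x` is equivalent under the maintained
-- invariant parent[y] ≤ y (unions always point the larger root at the smaller one)
def findRoot (parent : List Nat) (x : Nat) : Nat :=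
  let px := parent.getD x x
  if _h : px < x then findRoot parent px else x
termination_by x

def unionOp (parent : List Nat) (a b : Nat) : List Nat :=
  let ra := findRoot parent a
  let rb := findRoot parent b
  if ra = rb then parent
  else if ra < rb then parent.set rb ra else parent.set ra rb

def sum_of_islands_max_alt (grid : List (List Int)) : Int :=
  if grid.isEmpty || (grid.headD []).isEmpty then 0
  else
    let m := grid.length
    let n := (grid.headD []).length
    let parent := (List.range m).foldl (fun p r => (List.range n).foldl (fun (p : List Nat) c =>
        if 0 < cellv grid r c then
          let p1 := if r + 1 < m ∧ 0 < cellv grid (r + 1) c then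
              unionOp p (r * n + c) ((r + 1) * n + c) else p
          if c + 1 < n ∧ 0 < cellv grid r (c + 1) then
              unionOp p1 (r * n + c) (r * n + c + 1) else p1
        else p) p) (List.range (m * n))
    let best := (List.range m).foldl (fun b r => (List.range n).foldl (fun (b : List Int) c =>
        if 0 < cellv grid r c then
          let rt := findRoot parent (r * n + c)
          b.set rt (max (b.getD rt 0) (cellv grid r c))
        else b) b) (List.replicate (m * n) (0 : Int))
    best.sum

-- ===== PRECONDITION & SPEC =====
-- Pre_ excludes exactly the grids on which A raises IndexError: a non-empty grid with a
-- non-empty first row in which some row is shorter than the first (A indexes every row at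
-- all columns j < len(grid[0])).
def Pre_sum_of_islands_max (grid : List (List Int)) : Prop :=
  grid = [] ∨ (grid.headD []) = [] ∨ ∀ row ∈ grid, (grid.headD []).length ≤ row.length

instance (grid : List (List Int)) : Decidable (Pre_sum_of_islands_max grid) := by
  unfold Pre_sum_of_islands_max; infer_instance

def pvWitness_sum_of_islands_max : List (List Int) := [[1, 2], [0, 3]]

def Spec_sum_of_islands_max (grid : List (List Int)) (out : Int) : Prop := out = sum_of_islands_max_alt grid
instance (grid : List (List Int)) (out : Int) : Decidable (Spec_sum_of_islands_max grid out) := by unfold Spec_sum_of_islands_max; infer_instance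

-- ===== CLAIM (what is proved, stated in full; the proofs are below) =====
def Claim_equal_sum_of_islands_max : Prop := ∀ (grid : List (List Int)), Dom_sum_of_islands_max grid → Pre_sum_of_islands_max grid → Spec_sum_of_islands_max grid (sum_of_islands_max grid)

-- ===== LEMMAS AND PROOFS =====


--------------------------------------------------------------------------------
-- Arithmetic on flattened cell indices x = r * n + c
--------------------------------------------------------------------------------

lemma enc_lt {m n r c : Nat} (hr : r < m) (hc : c < n) : r * n + c < m * n := by
  calc r * n + c < (r + 1) * n := by nlinarith
    _ ≤ m * n := Nat.mul_le_mul_right n hr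

lemma enc_div {n r c : Nat} (hc : c < n) : (r * n + c) / n = r := by
  rw [mul_comm r n, Nat.mul_add_div (by omega)]
  simp [Nat.div_eq_of_lt hc]

lemma enc_mod {n r c : Nat} (hc : c < n) : (r * n + c) % n = c := by
  rw [mul_comm r n, Nat.mul_add_mod]
  exact Nat.mod_eq_of_lt hc

lemma dec_div_lt {x m n : Nat} (h : x < m * n) : x / n < m :=
  Nat.div_lt_of_lt_mul (by rw [mul_comm] at h; exact h)

lemma dec_eq (x n : Nat) : x / n * n + x % n = x := by
  rw [mul_comm]; exact Nat.div_add_mod x n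

--------------------------------------------------------------------------------
-- The common mathematical description: islands as connected components
--------------------------------------------------------------------------------

def valv (g : List (List Int)) (n x : Nat) : Int := cellv g (x / n) (x % n)

def posC (g : List (List Int)) (n x : Nat) : Prop := x < g.length * n ∧ 0 < valv g n x

def edgeC (g : List (List Int)) (n : Nat) (x y : Nat) : Prop :=
  posC g n x ∧ posC g n y ∧
    ∃ r c r' c', c < n ∧ c' < n ∧ x = r * n + c ∧ y = r' * n + c' ∧
      ((r = r' ∧ (c + 1 = c' ∨ c' + 1 = c)) ∨ (c = c' ∧ (r + 1 = r' ∨ r' + 1 = r)))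

def connC (g : List (List Int)) (n : Nat) : Nat → Nat → Prop := Relation.ReflTransGen (edgeC g n)

noncomputable def classF (g : List (List Int)) (n x : Nat) : Finset Nat :=
  @Finset.filter _ (fun y => connC g n x y) (Classical.decPred _) (Finset.range (g.length * n))

noncomputable def minCl (g : List (List Int)) (n x : Nat) : Nat := WithBot.unbotD x (classF g n x).min

noncomputable def maxCl (g : List (List Int)) (n x : Nat) : Int :=
  WithBot.unbotD 0 ((classF g n x).image (valv g n)).max

noncomputable def specSum (g : List (List Int)) (n : Nat) : Int :=
  ∑ x ∈ @Finset.filter _ (fun x => posC g n x ∧ minCl g n x = x) (Classical.decPred _)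
      (Finset.range (g.length * n)), maxCl g n x

lemma edgeC_symm {g : List (List Int)} {n x y : Nat} (h : edgeC g n x y) : edgeC g n y x := by
  obtain ⟨hx, hy, r, c, r', c', hc, hc', hxe, hye, hadj⟩ := h
  exact ⟨hy, hx, r', c', r, c, hc', hc, hye, hxe, by tauto⟩

lemma connC_symm {g : List (List Int)} {n x y : Nat} (h : connC g n x y) : connC g n y x :=
  Relation.ReflTransGen.symmetric (fun _ _ hxy => edgeC_symm hxy) h

lemma posC_of_connC {g : List (List Int)} {n x y : Nat} (hx : posC g n x) (h : connC g n x y) :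
    posC g n y := by
  induction h with
  | refl => exact hx
  | tail _ hbc ih => exact hbc.2.1

lemma mem_classF {g : List (List Int)} {n x y : Nat} :
    y ∈ classF g n x ↔ y < g.length * n ∧ connC g n x y := by
  simp [classF, Finset.mem_filter, Finset.mem_range]

lemma self_mem_classF {g : List (List Int)} {n x : Nat} (hx : posC g n x) : x ∈ classF g n x :=
  mem_classF.mpr ⟨hx.1, Relation.ReflTransGen.refl⟩

lemma classF_eq {g : List (List Int)} {n x y : Nat} (h : connC g n x y) :
    classF g n x = classF g n y := by
  ext z
  simp only [mem_classF]
  exact ⟨fun ⟨hz, hc⟩ => ⟨hz, Relation.ReflTransGen.trans (connC_symm h) hc⟩,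
    fun ⟨hz, hc⟩ => ⟨hz, Relation.ReflTransGen.trans h hc⟩⟩

lemma minCl_mem {g : List (List Int)} {n x : Nat} (hx : posC g n x) :
    minCl g n x ∈ classF g n x := by
  obtain ⟨a, ha⟩ := Finset.min_of_nonempty ⟨x, self_mem_classF hx⟩
  rw [minCl, ha]; exact Finset.mem_of_min ha

lemma minCl_le {g : List (List Int)} {n x y : Nat} (hy : y ∈ classF g n x) :
    minCl g n x ≤ y := by
  obtain ⟨a, ha⟩ := Finset.min_of_nonempty ⟨y, hy⟩
  rw [minCl, ha]
  have := Finset.min_le hy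
  rw [ha] at this
  exact_mod_cast this

lemma minCl_le_self {g : List (List Int)} {n x : Nat} (hx : posC g n x) : minCl g n x ≤ x :=
  minCl_le (self_mem_classF hx)

lemma minCl_congr {g : List (List Int)} {n x y : Nat} (hx : posC g n x) (h : connC g n x y) :
    minCl g n x = minCl g n y := by
  have hy : posC g n y := posC_of_connC hx h
  obtain ⟨a, ha⟩ := Finset.min_of_nonempty ⟨x, self_mem_classF hx⟩
  have hb : (classF g n y).min = a := by rw [← classF_eq h]; exact ha
  rw [minCl, minCl, ha, hb]; rfl

lemma minCl_eq_of {g : List (List Int)} {n x a : Nat} (ha : a ∈ classF g n x)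
    (hle : ∀ y ∈ classF g n x, a ≤ y) : minCl g n x = a := by
  have : (classF g n x).min = a :=
    le_antisymm (Finset.min_le ha)
      (by simp only [Finset.le_min_iff]
          exact fun y hy => WithBot.coe_le_coe.mpr (hle y hy))
  rw [minCl, this]; rfl

--------------------------------------------------------------------------------
-- The visited matrix of A, viewed as a finite set of flattened indices
--------------------------------------------------------------------------------

def shapeV (m n : Nat) (v : List (List Bool)) : Prop :=
  v.length = m ∧ ∀ row ∈ v, row.length = n

def vsetOf (m n : Nat) (v : List (List Bool)) : Finset Nat :=
  (Finset.range (m * n)).filter (fun z => vget v (z / n) (z % n) = true)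

lemma mem_vsetOf {m n : Nat} {v : List (List Bool)} {z : Nat} :
    z ∈ vsetOf m n v ↔ z < m * n ∧ vget v (z / n) (z % n) = true := by
  simp [vsetOf, Finset.mem_filter, Finset.mem_range]

lemma shapeV_replicate (m n : Nat) :
    shapeV m n (List.replicate m (List.replicate n false)) := by
  constructor
  · simp
  · intro row hrow
    rw [List.eq_of_mem_replicate hrow]; simp

lemma vget_replicate {m n r c : Nat} (hr : r < m) (hc : c < n) :
    vget (List.replicate m (List.replicate n false)) r c = false := by
  simp [vget, List.getD_eq_getElem?_getD, List.getElem?_replicate, hr, hc]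

lemma vsetOf_replicate (m n : Nat) (hn : 0 < n) :
    vsetOf m n (List.replicate m (List.replicate n false)) = ∅ := by
  ext z
  simp only [mem_vsetOf, Finset.notMem_empty, iff_false, not_and]
  intro hz
  rw [vget_replicate (dec_div_lt hz) (Nat.mod_lt _ hn)]
  simp

lemma shapeV_vset {m n : Nat} {v : List (List Bool)} (hs : shapeV m n v)
    {r : Nat} (hr : r < m) (c : Nat) : shapeV m n (vset v r c) := by
  refine ⟨by simp [vset, hs.1], ?_⟩
  intro row hrow
  rcases List.mem_or_eq_of_mem_set hrow with h | h
  · exact hs.2 _ h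
  · subst h
    have hrl : r < v.length := by rw [hs.1]; exact hr
    rw [List.getD_eq_getElem?_getD, List.getElem?_eq_getElem hrl]
    simp [hs.2 _ (List.getElem_mem hrl)]

lemma vget_vset_self {m n : Nat} {v : List (List Bool)} (hs : shapeV m n v)
    {r c : Nat} (hr : r < m) (hc : c < n) : vget (vset v r c) r c = true := by
  have hrl : r < v.length := by rw [hs.1]; exact hr
  have hcl' : c < v[r].length := by rw [hs.2 _ (List.getElem_mem hrl)]; exact hc
  simp [vget, vset, List.getD_eq_getElem?_getD, hrl, hcl']

lemma vget_vset_ne {v : List (List Bool)} {r c r' c' : Nat} (h : (r', c') ≠ (r, c)) :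
    vget (vset v r c) r' c' = vget v r' c' := by
  by_cases hr : r' = r
  · subst hr
    have hc : c ≠ c' := fun hh => h (by rw [hh])
    rcases Nat.lt_or_ge r' v.length with hrl | hrl
    · simp [vget, vset, List.getD_eq_getElem?_getD, List.getElem?_set, hrl, hc,
        List.getElem?_eq_getElem hrl]
    · simp [vget, vset, List.getD_eq_getElem?_getD, Nat.not_lt.mpr hrl]
  · have hr' : r ≠ r' := Ne.symm hr
    simp [vget, vset, List.getD_eq_getElem?_getD, List.getElem?_set, hr']

lemma vget_true_iff_mem {m n : Nat} {v : List (List Bool)} {r c : Nat}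
    (hr : r < m) (hc : c < n) :
    vget v r c = true ↔ (r * n + c) ∈ vsetOf m n v := by
  rw [mem_vsetOf, enc_div hc, enc_mod hc]
  simp [enc_lt hr hc]

lemma vsetOf_vset {m n : Nat} {v : List (List Bool)} (hs : shapeV m n v)
    {r c : Nat} (hr : r < m) (hc : c < n) :
    vsetOf m n (vset v r c) = insert (r * n + c) (vsetOf m n v) := by
  have hn : 0 < n := by omega
  ext z
  simp only [mem_vsetOf, Finset.mem_insert]
  constructor
  · rintro ⟨hz, hv⟩
    rcases Decidable.em (z = r * n + c) with hzc | hzc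
    · exact Or.inl hzc
    · refine Or.inr ⟨hz, ?_⟩
      have hpair : (z / n, z % n) ≠ (r, c) := by
        intro hpair
        apply hzc
        have h1 : z / n = r := congrArg Prod.fst hpair
        have h2 : z % n = c := congrArg Prod.snd hpair
        rw [← dec_eq z n, h1, h2]
      rw [← hv, vget_vset_ne hpair]
  · rintro (hzc | ⟨hz, hv⟩)
    · subst hzc
      refine ⟨enc_lt hr hc, ?_⟩
      rw [enc_div hc, enc_mod hc]
      exact vget_vset_self hs hr hc
    · refine ⟨hz, ?_⟩
      rcases Decidable.em ((z / n, z % n) = (r, c)) with hp | hp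
      · rw [Prod.mk.injEq] at hp
        rw [hp.1, hp.2]
        exact vget_vset_self hs hr hc
      · rw [vget_vset_ne hp]; exact hv



--------------------------------------------------------------------------------
-- A's BFS: invariants and specification
--------------------------------------------------------------------------------

def qmap (n : Nat) (q : List (Nat × Nat)) : List Nat := q.map (fun p => p.1 * n + p.2)

lemma posC_enc_iff {g : List (List Int)} {n r c : Nat} (hr : r < g.length) (hc : c < n) :
    posC g n (r * n + c) ↔ 0 < cellv g r c := by
  unfold posC valv
  rw [enc_div hc, enc_mod hc]
  simp [enc_lt hr hc]

lemma edgeC_enc_iff {g : List (List Int)} {n r c : Nat} (hr : r < g.length) (hc : c < n)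
    {w : Nat} :
    edgeC g n (r * n + c) w ↔ posC g n (r * n + c) ∧ posC g n w ∧
      ((0 < r ∧ w = (r - 1) * n + c) ∨ (w = (r + 1) * n + c) ∨
       (0 < c ∧ w = r * n + (c - 1)) ∨ (w = r * n + (c + 1) ∧ c + 1 < n)) := by
  constructor
  · rintro ⟨hx, hw, r1, c1, r2, c2, hc1, hc2, hxe, hwe, hadj⟩
    refine ⟨hx, hw, ?_⟩
    have hr1 : r = r1 := by
      have h1 := enc_div (r := r) hc
      have h2 := enc_div (r := r1) hc1
      rw [← hxe] at h2
      rw [← h1, ← h2]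
    have hc1' : c = c1 := by
      have h1 := enc_mod (r := r) hc
      have h2 := enc_mod (r := r1) hc1
      rw [← hxe] at h2
      rw [← h1, ← h2]
    subst hr1; subst hc1'
    rcases hadj with ⟨hre, hcs⟩ | ⟨hce, hrs⟩
    · subst hre
      rcases hcs with h | h
      · exact Or.inr (Or.inr (Or.inr ⟨by rw [hwe, ← h], by omega⟩))
      · refine Or.inr (Or.inr (Or.inl ⟨by omega, ?_⟩))
        rw [hwe]
        congr 1
        omega
    · subst hce
      rcases hrs with h | h
      · exact Or.inr (Or.inl (by rw [hwe, ← h]))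
      · refine Or.inl ⟨by omega, ?_⟩
        rw [hwe]
        congr 2
        omega
  · rintro ⟨hx, hw, hcase⟩
    rcases hcase with ⟨hr0, rfl⟩ | rfl | ⟨hc0, rfl⟩ | ⟨rfl, hlt⟩
    · exact ⟨hx, hw, r, c, r - 1, c, hc, hc, rfl, rfl, Or.inr ⟨rfl, Or.inr (by omega)⟩⟩
    · exact ⟨hx, hw, r, c, r + 1, c, hc, hc, rfl, rfl, Or.inr ⟨rfl, Or.inl rfl⟩⟩
    · exact ⟨hx, hw, r, c, r, c - 1, hc, by omega, rfl, rfl, Or.inl ⟨rfl, Or.inr (by omega)⟩⟩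
    · exact ⟨hx, hw, r, c, r, c + 1, hc, hlt, rfl, rfl, Or.inl ⟨rfl, Or.inl rfl⟩⟩

structure BfsInv (g : List (List Int)) (n : Nat) (V : Finset Nat) (x : Nat)
    (visited : List (List Bool)) (q : List (Nat × Nat)) : Prop where
  shape : shapeV g.length n visited
  subV : V ⊆ vsetOf g.length n visited
  seed : x ∈ vsetOf g.length n visited
  qmem : ∀ p ∈ q, p.1 < g.length ∧ p.2 < n ∧
    (p.1 * n + p.2) ∈ vsetOf g.length n visited ∧ (p.1 * n + p.2) ∉ V
  qnodup : (qmap n q).Nodup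
  inCl : ∀ z ∈ vsetOf g.length n visited, z ∉ V → connC g n x z
  closed : ∀ z ∈ vsetOf g.length n visited, z ∉ V → z ∉ qmap n q →
    ∀ w, edgeC g n z w → w ∈ vsetOf g.length n visited

structure MidInv (g : List (List Int)) (n : Nat) (V : Finset Nat) (x y : Nat)
    (st : List (List Bool) × List (Nat × Nat)) : Prop where
  shape : shapeV g.length n st.1
  subV : V ⊆ vsetOf g.length n st.1
  seed : x ∈ vsetOf g.length n st.1
  ymem : y ∈ vsetOf g.length n st.1
  ynV : y ∉ V
  qmem : ∀ p ∈ st.2, p.1 < g.length ∧ p.2 < n ∧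
    (p.1 * n + p.2) ∈ vsetOf g.length n st.1 ∧ (p.1 * n + p.2) ∉ V ∧ (p.1 * n + p.2) ≠ y
  qnodup : (qmap n st.2).Nodup
  inCl : ∀ z ∈ vsetOf g.length n st.1, z ∉ V → connC g n x z
  closed : ∀ z ∈ vsetOf g.length n st.1, z ∉ V → z ∉ qmap n st.2 → z ≠ y →
    ∀ w, edgeC g n z w → w ∈ vsetOf g.length n st.1

lemma tryPush_mid {g : List (List Int)} {n : Nat} {V : Finset Nat} {x y : Nat}
    {st : List (List Bool) × List (Nat × Nat)}
    (hx : posC g n x) (hVd : ∀ z ∈ V, ¬ connC g n x z)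
    (hM : MidInv g n V x y st) (ok : Bool) {r' c' : Nat}
    (hok : ok = true → r' < g.length ∧ c' < n ∧
      (posC g n (r' * n + c') → edgeC g n y (r' * n + c'))) :
    MidInv g n V x y (tryPush g st ok r' c') ∧
    vsetOf g.length n st.1 ⊆ vsetOf g.length n (tryPush g st ok r' c').1 ∧
    (ok = true → posC g n (r' * n + c') →
      (r' * n + c') ∈ vsetOf g.length n (tryPush g st ok r' c').1) ∧
    (vsetOf g.length n (tryPush g st ok r' c').1 \ V) \
        (qmap n (tryPush g st ok r' c').2).toFinset =
      (vsetOf g.length n st.1 \ V) \ (qmap n st.2).toFinset := by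
  by_cases hcond : (ok && decide (0 < cellv g r' c') && !vget st.1 r' c') = true
  · simp only [Bool.and_eq_true, Bool.not_eq_true', decide_eq_true_eq] at hcond
    obtain ⟨⟨hokt, hcv⟩, hvg⟩ := hcond
    obtain ⟨hr', hc', hedge⟩ := hok hokt
    have hpos : posC g n (r' * n + c') := (posC_enc_iff hr' hc').mpr hcv
    have hed : edgeC g n y (r' * n + c') := hedge hpos
    have hconny : connC g n x y := hM.inCl y hM.ymem hM.ynV
    have hconn : connC g n x (r' * n + c') := Relation.ReflTransGen.tail hconny hed
    have hnV : (r' * n + c') ∉ V := fun hmem => hVd _ hmem hconn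
    have hnmem : (r' * n + c') ∉ vsetOf g.length n st.1 := by
      rw [← vget_true_iff_mem hr' hc']
      simp [hvg]
    have hset : vsetOf g.length n (vset st.1 r' c') =
        insert (r' * n + c') (vsetOf g.length n st.1) := vsetOf_vset hM.shape hr' hc'
    have hne_y : (r' * n + c') ≠ y := fun h => hnmem (h ▸ hM.ymem)
    have hpush : tryPush g st ok r' c' = (vset st.1 r' c', st.2 ++ [(r', c')]) := by
      rw [tryPush, if_pos]
      simp [hokt, hcv, hvg]
    rw [hpush]
    have hqmap : qmap n (st.2 ++ [(r', c')]) = qmap n st.2 ++ [r' * n + c'] := by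
      simp [qmap]
    have hnotin_q : (r' * n + c') ∉ qmap n st.2 := by
      intro hmem
      simp only [qmap, List.mem_map] at hmem
      obtain ⟨p, hp, hpe⟩ := hmem
      exact hnmem (hpe ▸ (hM.qmem p hp).2.2.1)
    refine ⟨?_, ?_, ?_, ?_⟩
    · refine ⟨shapeV_vset hM.shape hr' _, ?_, ?_, ?_, hM.ynV, ?_, ?_, ?_, ?_⟩
      · intro z hz
        rw [hset]
        exact Finset.mem_insert_of_mem (hM.subV hz)
      · rw [hset]; exact Finset.mem_insert_of_mem hM.seed
      · rw [hset]; exact Finset.mem_insert_of_mem hM.ymem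
      · intro p hp
        rcases List.mem_append.mp hp with hp | hp
        · obtain ⟨h1, h2, h3, h4, h5⟩ := hM.qmem p hp
          exact ⟨h1, h2, by rw [hset]; exact Finset.mem_insert_of_mem h3, h4, h5⟩
        · simp only [List.mem_singleton] at hp
          subst hp
          exact ⟨hr', hc', by rw [hset]; exact Finset.mem_insert_self _ _, hnV, hne_y⟩
      · rw [hqmap]
        exact List.Nodup.append hM.qnodup (List.nodup_singleton _)
          (by simpa using hnotin_q)
      · intro z hz hzV
        rw [hset] at hz
        rcases Finset.mem_insert.mp hz with hz | hz
        · exact hz ▸ hconn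
        · exact hM.inCl z hz hzV
      · intro z hz hzV hzq hzy w hw
        rw [hset] at hz ⊢
        rw [hqmap] at hzq
        have hzq' : z ∉ qmap n st.2 := fun hmem => hzq (List.mem_append.mpr (Or.inl hmem))
        rcases Finset.mem_insert.mp hz with hz | hz
        · exact absurd (hz ▸ List.mem_append.mpr (Or.inr (by simp))) hzq
        · exact Finset.mem_insert_of_mem (hM.closed z hz hzV hzq' hzy w hw)
    · intro z hz
      rw [hset]
      exact Finset.mem_insert_of_mem hz
    · intro _ _
      rw [hset]
      exact Finset.mem_insert_self _ _
    · rw [hset, hqmap]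
      ext z
      simp only [Finset.mem_sdiff, Finset.mem_insert, List.toFinset_append,
        Finset.mem_union, List.mem_toFinset, List.mem_singleton]
      constructor
      · rintro ⟨⟨hz | hz, hzV⟩, hzq⟩
        · exact absurd (Or.inr hz) hzq
        · exact ⟨⟨hz, hzV⟩, fun hmem => hzq (Or.inl (by simpa using hmem))⟩
      · rintro ⟨⟨hz, hzV⟩, hzq⟩
        refine ⟨⟨Or.inr hz, hzV⟩, ?_⟩
        rintro (hmem | hmem)
        · exact hzq (by simpa using hmem)
        · exact hnmem (hmem ▸ hz)
  · have hpush : tryPush g st ok r' c' = st := by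
      rw [tryPush, if_neg hcond]
    rw [hpush]
    refine ⟨hM, Finset.Subset.refl _, ?_, rfl⟩
    intro hokt hpos
    obtain ⟨hr', hc', _⟩ := hok hokt
    have hcv : 0 < cellv g r' c' := (posC_enc_iff hr' hc').mp hpos
    have hvg : vget st.1 r' c' = true := by
      by_contra hvg
      apply hcond
      simp [hokt, hcv, Bool.not_eq_true] at hvg ⊢
      simp [hvg]
    rw [← vget_true_iff_mem hr' hc']
    exact hvg

lemma valv_enc {g : List (List Int)} {n r c : Nat} (hc : c < n) :
    valv g n (r * n + c) = cellv g r c := by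
  rw [valv, enc_div hc, enc_mod hc]

lemma bfs_base {g : List (List Int)} {n : Nat} {V : Finset Nat} {x : Nat}
    {visited : List (List Bool)} {im : Int}
    (hx : posC g n x) (hVd : ∀ z ∈ V, ¬ connC g n x z)
    (hInv : BfsInv g n V x visited [])
    (him : im = WithBot.unbotD 0 (((insert x ((vsetOf g.length n visited \ V) \
        (qmap n []).toFinset)).image (valv g n)).max)) :
    shapeV g.length n visited ∧
    vsetOf g.length n visited = V ∪ classF g n x ∧
    im = maxCl g n x := by
  have hsub : ∀ z, connC g n x z → z ∈ vsetOf g.length n visited := by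
    intro z hz
    induction hz with
    | refl => exact hInv.seed
    | @tail b w hab hbc ih =>
      have hbV : b ∉ V := fun hmem => hVd b hmem hab
      exact hInv.closed b ih hbV (by simp [qmap]) _ hbc
  have hD : (vsetOf g.length n visited \ V) \ (qmap n []).toFinset = classF g n x := by
    ext z
    simp only [qmap, List.map_nil, List.toFinset_nil, Finset.sdiff_empty, Finset.mem_sdiff]
    constructor
    · rintro ⟨hz, hzV⟩
      exact mem_classF.mpr ⟨(mem_vsetOf.mp hz).1, hInv.inCl z hz hzV⟩
    · intro hz
      obtain ⟨hzN, hzc⟩ := mem_classF.mp hz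
      exact ⟨hsub z hzc, fun hmem => hVd z hmem hzc⟩
  refine ⟨hInv.shape, ?_, ?_⟩
  · ext z
    simp only [Finset.mem_union]
    constructor
    · intro hz
      by_cases hzV : z ∈ V
      · exact Or.inl hzV
      · exact Or.inr (mem_classF.mpr ⟨(mem_vsetOf.mp hz).1, hInv.inCl z hz hzV⟩)
    · rintro (hz | hz)
      · exact hInv.subV hz
      · exact hsub z (mem_classF.mp hz).2
  · rw [him, hD, Finset.insert_eq_self.mpr (self_mem_classF hx)]
    rfl

lemma bfsLoop_spec (g : List (List Int)) (n : Nat) (V : Finset Nat) (x : Nat)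
    (hx : posC g n x) (hVd : ∀ z ∈ V, ¬ connC g n x z) :
    ∀ (fuel : Nat) (visited : List (List Bool)) (q : List (Nat × Nat)) (im : Int),
      5 * countFalse visited + q.length ≤ fuel →
      BfsInv g n V x visited q →
      im = WithBot.unbotD 0 (((insert x ((vsetOf g.length n visited \ V) \
          (qmap n q).toFinset)).image (valv g n)).max) →
      shapeV g.length n (bfsLoop g g.length n visited q im).1 ∧
      vsetOf g.length n (bfsLoop g g.length n visited q im).1 = V ∪ classF g n x ∧
      (bfsLoop g g.length n visited q im).2 = maxCl g n x := by
  intro fuel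
  induction fuel with
  | zero =>
    intro visited q im hfuel hInv him
    cases q with
    | nil =>
      rw [bfsLoop]
      exact bfs_base hx hVd hInv him
    | cons hd qs => simp at hfuel
  | succ f ih =>
    intro visited q im hfuel hInv him
    cases q with
    | nil =>
      rw [bfsLoop]
      exact bfs_base hx hVd hInv him
    | cons hd qs =>
      obtain ⟨r, c⟩ := hd
      obtain ⟨hr, hc, hymem, hynV⟩ := hInv.qmem (r, c) List.mem_cons_self
      have hynq : (r * n + c) ∉ qmap n qs := by
        have h := hInv.qnodup
        simp only [qmap, List.map_cons, List.nodup_cons] at h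
        exact h.1
      have hposy : posC g n (r * n + c) :=
        posC_of_connC hx (hInv.inCl _ hymem hynV)
      have hmid0 : MidInv g n V x (r * n + c) (visited, qs) :=
        { shape := hInv.shape, subV := hInv.subV, seed := hInv.seed,
          ymem := hymem, ynV := hynV,
          qmem := by
            intro p hp
            obtain ⟨h1, h2, h3, h4⟩ := hInv.qmem p (List.mem_cons_of_mem _ hp)
            refine ⟨h1, h2, h3, h4, ?_⟩
            intro he
            exact hynq (he ▸ List.mem_map_of_mem hp)
          qnodup := by
            have h := hInv.qnodup
            simp only [qmap, List.map_cons, List.nodup_cons] at h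
            exact h.2
          inCl := hInv.inCl,
          closed := by
            intro z hz hzV hzq hzy w hw
            refine hInv.closed z hz hzV ?_ w hw
            simp only [qmap, List.map_cons, List.mem_cons]
            rintro (h | h)
            · exact hzy h
            · exact hzq h }
      have h1 := tryPush_mid hx hVd hmid0 (decide (0 < r)) (r' := r - 1) (c' := c)
        (by
          intro hokt
          rw [decide_eq_true_eq] at hokt
          refine ⟨by omega, hc, fun hpos => ?_⟩
          exact (edgeC_enc_iff hr hc).mpr ⟨hposy, hpos, Or.inl ⟨hokt, rfl⟩⟩)
      have h2 := tryPush_mid hx hVd h1.1 (decide (r + 1 < g.length)) (r' := r + 1) (c' := c)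
        (by
          intro hokt
          rw [decide_eq_true_eq] at hokt
          refine ⟨hokt, hc, fun hpos => ?_⟩
          exact (edgeC_enc_iff hr hc).mpr ⟨hposy, hpos, Or.inr (Or.inl rfl)⟩)
      have h3 := tryPush_mid hx hVd h2.1 (decide (0 < c)) (r' := r) (c' := c - 1)
        (by
          intro hokt
          rw [decide_eq_true_eq] at hokt
          refine ⟨hr, by omega, fun hpos => ?_⟩
          exact (edgeC_enc_iff hr hc).mpr ⟨hposy, hpos, Or.inr (Or.inr (Or.inl ⟨hokt, rfl⟩))⟩)
      have h4 := tryPush_mid hx hVd h3.1 (decide (c + 1 < n)) (r' := r) (c' := c + 1)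
        (by
          intro hokt
          rw [decide_eq_true_eq] at hokt
          refine ⟨hr, hokt, fun hpos => ?_⟩
          exact (edgeC_enc_iff hr hc).mpr ⟨hposy, hpos, Or.inr (Or.inr (Or.inr ⟨rfl, hokt⟩))⟩)
      set st1 := tryPush g (visited, qs) (decide (0 < r)) (r - 1) c with hst1
      set st2 := tryPush g st1 (decide (r + 1 < g.length)) (r + 1) c with hst2
      set st3 := tryPush g st2 (decide (0 < c)) r (c - 1) with hst3
      set st4 := tryPush g st3 (decide (c + 1 < n)) r (c + 1) with hst4
      have hmono12 : vsetOf g.length n st1.1 ⊆ vsetOf g.length n st4.1 :=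
        (h2.2.1.trans h3.2.1).trans h4.2.1
      have hmono23 : vsetOf g.length n st2.1 ⊆ vsetOf g.length n st4.1 :=
        h3.2.1.trans h4.2.1
      have hInv4 : BfsInv g n V x st4.1 st4.2 :=
        { shape := h4.1.shape, subV := h4.1.subV, seed := h4.1.seed,
          qmem := fun p hp => ⟨(h4.1.qmem p hp).1, (h4.1.qmem p hp).2.1,
            (h4.1.qmem p hp).2.2.1, (h4.1.qmem p hp).2.2.2.1⟩,
          qnodup := h4.1.qnodup,
          inCl := h4.1.inCl,
          closed := by
            intro z hz hzV hzq w hw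
            by_cases hzy : z = r * n + c
            · subst hzy
              obtain ⟨_, hwpos, hcases⟩ := (edgeC_enc_iff hr hc).mp hw
              rcases hcases with ⟨hr0, rfl⟩ | rfl | ⟨hc0, rfl⟩ | ⟨rfl, hlt⟩
              · exact hmono12 (h1.2.2.1 (decide_eq_true hr0) hwpos)
              · have hrm : r + 1 < g.length := by
                  have hlt := hwpos.1
                  have := enc_div (r := r + 1) hc
                  rw [← this]
                  exact dec_div_lt hlt
                exact hmono23 (h2.2.2.1 (decide_eq_true hrm) hwpos)
              · exact h4.2.1 (h3.2.2.1 (decide_eq_true hc0) hwpos)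
              · exact h4.2.2.1 (decide_eq_true hlt) hwpos
            · exact h4.1.closed z hz hzV hzq hzy w hw }
      have hDchain : (vsetOf g.length n st4.1 \ V) \ (qmap n st4.2).toFinset =
          (vsetOf g.length n visited \ V) \ (qmap n qs).toFinset := by
        rw [h4.2.2.2, h3.2.2.2, h2.2.2.2, h1.2.2.2]
      have hDpop : (vsetOf g.length n visited \ V) \ (qmap n qs).toFinset =
          insert (r * n + c) ((vsetOf g.length n visited \ V) \
            (qmap n ((r, c) :: qs)).toFinset) := by
        have hq' : qmap n ((r, c) :: qs) = (r * n + c) :: qmap n qs := by simp [qmap]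
        have hyin : (r * n + c) ∈ (vsetOf g.length n visited \ V) \
            (qmap n qs).toFinset := by
          rw [Finset.mem_sdiff, Finset.mem_sdiff]
          exact ⟨⟨hymem, hynV⟩, by simpa using hynq⟩
        rw [hq', List.toFinset_cons, Finset.sdiff_insert]
        exact (Finset.insert_erase hyin).symm
      have hfuel4 : 5 * countFalse st4.1 + st4.2.length ≤ f := by
        have e1 : 5 * countFalse st1.1 + st1.2.length ≤ 5 * countFalse visited + qs.length :=
          tryPush_measure g (visited, qs) _ _ _
        have e2 : 5 * countFalse st2.1 + st2.2.length ≤ 5 * countFalse st1.1 + st1.2.length :=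
          tryPush_measure g st1 _ _ _
        have e3 : 5 * countFalse st3.1 + st3.2.length ≤ 5 * countFalse st2.1 + st2.2.length :=
          tryPush_measure g st2 _ _ _
        have e4 : 5 * countFalse st4.1 + st4.2.length ≤ 5 * countFalse st3.1 + st3.2.length :=
          tryPush_measure g st3 _ _ _
        simp only [List.length_cons] at hfuel
        omega
      have him4 : (if im < cellv g r c then cellv g r c else im) =
          WithBot.unbotD 0 (((insert x ((vsetOf g.length n st4.1 \ V) \
            (qmap n st4.2).toFinset)).image (valv g n)).max) := by
        rw [hDchain, hDpop]
        rw [Finset.insert_comm]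
        obtain ⟨M, hM⟩ := Finset.max_of_nonempty
          (Finset.Nonempty.image (s := insert x ((vsetOf g.length n visited \ V) \
            (qmap n ((r, c) :: qs)).toFinset)) (Finset.insert_nonempty _ _) (f := valv g n))
        rw [Finset.image_insert, Finset.max_insert, hM]
        rw [him, hM]
        have hcoe : (valv g n (r * n + c) : WithBot Int) ⊔ (M : WithBot Int) =
            ((max (valv g n (r * n + c)) M : Int) : WithBot Int) := by
          rw [← WithBot.coe_sup]
        rw [hcoe]
        simp only [WithBot.unbotD_coe]
        rw [valv_enc hc]
        rcases lt_or_ge (M : Int) (cellv g r c) with hlt | hge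
        · rw [if_pos hlt, max_eq_left (le_of_lt hlt)]
        · rw [if_neg (not_lt.mpr hge), max_eq_right hge]
      have hres := ih st4.1 st4.2 (if im < cellv g r c then cellv g r c else im)
        hfuel4 hInv4 him4
      rw [bfsLoop]
      exact hres



--------------------------------------------------------------------------------
-- A's outer scan over all cells in row-major order
--------------------------------------------------------------------------------

lemma foldl_range_mul {α : Type} (m n : Nat) (f : α → Nat → Nat → α) (init : α) :
    (List.range m).foldl (fun st i => (List.range n).foldl (fun st j => f st i j) st) init
      = (List.range (m * n)).foldl (fun st x => f st (x / n) (x % n)) init := by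
  induction m generalizing init with
  | zero => simp
  | succ m ih =>
    rw [List.range_succ, List.foldl_append, ih, Nat.succ_mul, List.range_add,
      List.foldl_append, List.foldl_map, List.foldl_cons, List.foldl_nil]
    apply PySem.List.foldl_congr_mem
    intro acc j hj
    rw [List.mem_range] at hj
    rw [enc_div hj, enc_mod hj]

noncomputable def Vt (g : List (List Int)) (n t : Nat) : Finset Nat :=
  @Finset.filter _ (fun y => posC g n y ∧ minCl g n y < t) (Classical.decPred _)
    (Finset.range (g.length * n))

noncomputable def sumT (g : List (List Int)) (n t : Nat) : Int :=
  ∑ z ∈ @Finset.filter _ (fun z => posC g n z ∧ minCl g n z = z) (Classical.decPred _)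
      (Finset.range t), maxCl g n z

def stepA (g : List (List Int)) (n : Nat) (st : List (List Bool) × Int) (x : Nat) :
    List (List Bool) × Int :=
  if 0 < cellv g (x / n) (x % n) ∧ vget st.1 (x / n) (x % n) = false then
    ((bfsLoop g g.length n (vset st.1 (x / n) (x % n)) [(x / n, x % n)]
        (cellv g (x / n) (x % n))).1,
      st.2 + (bfsLoop g g.length n (vset st.1 (x / n) (x % n)) [(x / n, x % n)]
        (cellv g (x / n) (x % n))).2)
  else st

lemma Vt_succ_of_not_trigger {g : List (List Int)} {n t : Nat}
    (h : ¬ (posC g n t ∧ minCl g n t = t)) : Vt g n (t + 1) = Vt g n t := by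
  ext y
  simp only [Vt, Finset.mem_filter, Finset.mem_range]
  constructor
  · rintro ⟨hy, hyp, hylt⟩
    refine ⟨hy, hyp, ?_⟩
    rcases Nat.lt_succ_iff_lt_or_eq.mp hylt with h' | h'
    · exact h'
    · exfalso
      have htm : t ∈ classF g n y := h' ▸ minCl_mem hyp
      obtain ⟨_, hconn⟩ := mem_classF.mp htm
      have hpt : posC g n t := posC_of_connC hyp hconn
      have : minCl g n y = minCl g n t := minCl_congr hyp hconn
      exact h ⟨hpt, by rw [← this, h']⟩
  · rintro ⟨hy, hyp, hylt⟩
    exact ⟨hy, hyp, by omega⟩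

lemma sumT_succ_of_not_trigger {g : List (List Int)} {n t : Nat}
    (h : ¬ (posC g n t ∧ minCl g n t = t)) : sumT g n (t + 1) = sumT g n t := by
  rw [sumT, sumT, Finset.range_add_one, Finset.filter_insert, if_neg h]

lemma Vt_succ_trigger {g : List (List Int)} {n t : Nat} (hpos : posC g n t)
    (heq : minCl g n t = t) : Vt g n t ∪ classF g n t = Vt g n (t + 1) := by
  ext y
  simp only [Vt, Finset.mem_union, Finset.mem_filter, Finset.mem_range]
  constructor
  · rintro (⟨hy, hyp, hylt⟩ | hy)
    · exact ⟨hy, hyp, by omega⟩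
    · obtain ⟨hyN, hconn⟩ := mem_classF.mp hy
      refine ⟨hyN, posC_of_connC hpos hconn, ?_⟩
      rw [← minCl_congr hpos hconn, heq]
      omega
  · rintro ⟨hy, hyp, hylt⟩
    rcases Nat.lt_succ_iff_lt_or_eq.mp hylt with h' | h'
    · exact Or.inl ⟨hy, hyp, h'⟩
    · refine Or.inr (mem_classF.mpr ⟨hy, ?_⟩)
      have htm : t ∈ classF g n y := h' ▸ minCl_mem hyp
      exact connC_symm (mem_classF.mp htm).2

lemma sumT_succ_trigger {g : List (List Int)} {n t : Nat} (hpos : posC g n t)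
    (heq : minCl g n t = t) : sumT g n (t + 1) = sumT g n t + maxCl g n t := by
  rw [sumT, sumT, Finset.range_add_one, Finset.filter_insert, if_pos ⟨hpos, heq⟩,
    Finset.sum_insert (by simp)]
  ring

lemma outerA_inv (g : List (List Int)) (n : Nat) (hn : 0 < n) :
    ∀ t, t ≤ g.length * n →
      shapeV g.length n ((List.range t).foldl (stepA g n)
          (List.replicate g.length (List.replicate n false), (0 : Int))).1 ∧
      vsetOf g.length n ((List.range t).foldl (stepA g n)
          (List.replicate g.length (List.replicate n false), (0 : Int))).1 = Vt g n t ∧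
      ((List.range t).foldl (stepA g n)
          (List.replicate g.length (List.replicate n false), (0 : Int))).2 = sumT g n t := by
  intro t
  induction t with
  | zero =>
    intro _
    simp only [List.range_zero, List.foldl_nil]
    refine ⟨shapeV_replicate _ _, ?_, ?_⟩
    · rw [vsetOf_replicate _ _ hn]
      symm
      rw [Finset.eq_empty_iff_forall_notMem]
      intro y
      simp [Vt, Finset.mem_filter]
    · simp [sumT]
  | succ t ih =>
    intro ht
    have ht' : t < g.length * n := by omega
    obtain ⟨hsh, hV, hsum⟩ := ih (le_of_lt ht')
    rw [List.range_succ, List.foldl_append, List.foldl_cons, List.foldl_nil]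
    have hi : t / n < g.length := dec_div_lt ht'
    have hj : t % n < n := Nat.mod_lt _ hn
    have henc : t / n * n + t % n = t := dec_eq t n
    by_cases hpos : posC g n t
    · have hcv : 0 < cellv g (t / n) (t % n) := hpos.2
      rcases lt_or_eq_of_le (minCl_le_self hpos) with hlt | heq
      · -- the component of t was already fully visited
        have hmem : t ∈ vsetOf g.length n
            ((List.range t).foldl (stepA g n)
              (List.replicate g.length (List.replicate n false), (0 : Int))).1 := by
          rw [hV]
          simp only [Vt, Finset.mem_filter, Finset.mem_range]
          exact ⟨ht', hpos, hlt⟩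
        have hvg : vget ((List.range t).foldl (stepA g n)
            (List.replicate g.length (List.replicate n false), (0 : Int))).1
            (t / n) (t % n) = true := by
          rw [vget_true_iff_mem hi hj, henc]
          exact hmem
        rw [stepA, if_neg (by simp [hvg])]
        refine ⟨hsh, ?_, ?_⟩
        · rw [hV, Vt_succ_of_not_trigger (by rintro ⟨_, h⟩; omega)]
        · rw [hsum, sumT_succ_of_not_trigger (by rintro ⟨_, h⟩; omega)]
      · -- a fresh island: run the BFS
        have hnmem : t ∉ Vt g n t := by
          simp only [Vt, Finset.mem_filter, Finset.mem_range]
          rintro ⟨_, _, h⟩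
          omega
        have hvg : vget ((List.range t).foldl (stepA g n)
            (List.replicate g.length (List.replicate n false), (0 : Int))).1
            (t / n) (t % n) = false := by
          rw [← Bool.not_eq_true, vget_true_iff_mem hi hj, henc, hV]
          exact hnmem
        rw [stepA, if_pos ⟨hcv, hvg⟩]
        have hVd : ∀ z ∈ Vt g n t, ¬ connC g n t z := by
          intro z hz hconn
          simp only [Vt, Finset.mem_filter, Finset.mem_range] at hz
          obtain ⟨_, hzp, hzlt⟩ := hz
          have := minCl_congr hpos hconn
          omega
        have hset : vsetOf g.length n (vset ((List.range t).foldl (stepA g n)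
            (List.replicate g.length (List.replicate n false), (0 : Int))).1
            (t / n) (t % n)) = insert t (Vt g n t) := by
          rw [vsetOf_vset hsh hi hj, henc, hV]
        have hshape' := shapeV_vset hsh hi (t % n)
        have hInv : BfsInv g n (Vt g n t) t (vset ((List.range t).foldl (stepA g n)
            (List.replicate g.length (List.replicate n false), (0 : Int))).1
            (t / n) (t % n)) [(t / n, t % n)] :=
          { shape := hshape',
            subV := by rw [hset]; exact fun z hz => Finset.mem_insert_of_mem hz,
            seed := by rw [hset]; exact Finset.mem_insert_self _ _,
            qmem := by
              intro p hp
              simp only [List.mem_singleton] at hp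
              subst hp
              refine ⟨hi, hj, ?_, ?_⟩
              · rw [hset, henc]; exact Finset.mem_insert_self _ _
              · rw [henc]; exact hnmem,
            qnodup := List.nodup_singleton _,
            inCl := by
              intro z hz hzV
              rw [hset] at hz
              rcases Finset.mem_insert.mp hz with rfl | hz
              · exact Relation.ReflTransGen.refl
              · exact absurd hz hzV,
            closed := by
              intro z hz hzV hzq w hw
              rw [hset] at hz
              rcases Finset.mem_insert.mp hz with rfl | hz
              · exact absurd (by simp [qmap, henc]) hzq
              · exact absurd hz hzV }
        have him : cellv g (t / n) (t % n) =
            WithBot.unbotD 0 (((insert t ((vsetOf g.length n (vset ((List.range t).foldl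
              (stepA g n) (List.replicate g.length (List.replicate n false), (0 : Int))).1
              (t / n) (t % n)) \ Vt g n t) \
              (qmap n [(t / n, t % n)]).toFinset)).image (valv g n)).max) := by
          rw [hset]
          have hD : ((insert t (Vt g n t) \ Vt g n t) \
              (qmap n [(t / n, t % n)]).toFinset) = ∅ := by
            ext z
            simp only [Finset.mem_sdiff, Finset.mem_insert, Finset.notMem_empty,
              iff_false, not_and, not_not, qmap, List.map_cons, List.map_nil,
              List.toFinset_cons, List.toFinset_nil, List.mem_toFinset]
            rintro ⟨(rfl | hz), hzV⟩
            · simp [henc]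
            · exact absurd hz hzV
          rw [hD]
          simp [valv, henc]
        obtain ⟨hsh2, hV2, him2⟩ := bfsLoop_spec g n (Vt g n t) t hpos hVd
          (5 * countFalse (vset ((List.range t).foldl (stepA g n)
            (List.replicate g.length (List.replicate n false), (0 : Int))).1
            (t / n) (t % n)) + 1)
          _ _ _ (by simp) hInv him
        refine ⟨hsh2, ?_, ?_⟩
        · rw [hV2, ← Vt_succ_trigger hpos heq]
        · rw [him2, hsum, sumT_succ_trigger hpos heq]
    · -- not a positive cell
      have hcv : ¬ 0 < cellv g (t / n) (t % n) := by
        intro h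
        exact hpos ⟨ht', h⟩
      rw [stepA, if_neg (by rintro ⟨h, _⟩; exact hcv h)]
      refine ⟨hsh, ?_, ?_⟩
      · rw [hV, Vt_succ_of_not_trigger (by rintro ⟨h, _⟩; exact hpos h)]
      · rw [hsum, sumT_succ_of_not_trigger (by rintro ⟨h, _⟩; exact hpos h)]

lemma specSum_eq_sumT (g : List (List Int)) (n : Nat) :
    specSum g n = sumT g n (g.length * n) := rfl

lemma A_eq (g : List (List Int)) (hm : 0 < g.length) (hn : 0 < (g.headD []).length) :
    sum_of_islands_max g = specSum g (g.headD []).length := by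
  have hguard : ¬ ((g.isEmpty || (g.headD []).isEmpty) = true) := by
    simp only [Bool.or_eq_true, List.isEmpty_iff, not_or]
    constructor
    · intro h; rw [h] at hm; simp at hm
    · intro h; rw [h] at hn; simp at hn
  rw [sum_of_islands_max, if_neg hguard]
  show ((List.range g.length).foldl (fun st i =>
      (List.range (g.headD []).length).foldl (fun (st : List (List Bool) × Int) j =>
        if 0 < cellv g i j ∧ vget st.1 i j = false then
          ((bfsLoop g g.length ((g.headD []).length) (vset st.1 i j) [(i, j)]
              (cellv g i j)).1,
            st.2 + (bfsLoop g g.length ((g.headD []).length) (vset st.1 i j) [(i, j)]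
              (cellv g i j)).2)
        else st) st)
    (List.replicate g.length (List.replicate (g.headD []).length false), (0 : Int))).2
      = specSum g (g.headD []).length
  rw [foldl_range_mul g.length ((g.headD []).length)
    (fun st i j => if 0 < cellv g i j ∧ vget st.1 i j = false then
      ((bfsLoop g g.length ((g.headD []).length) (vset st.1 i j) [(i, j)] (cellv g i j)).1,
        st.2 + (bfsLoop g g.length ((g.headD []).length) (vset st.1 i j) [(i, j)]
          (cellv g i j)).2)
      else st)]
  have h := (outerA_inv g ((g.headD []).length) hn (g.length * (g.headD []).length)
    (le_refl _)).2.2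
  rw [specSum_eq_sumT]
  exact h


--------------------------------------------------------------------------------
-- B's union-find: parent-array theory
--------------------------------------------------------------------------------

def parOk (N : Nat) (p : List Nat) : Prop :=
  p.length = N ∧ ∀ y, y < N → p.getD y y ≤ y

lemma getD_set_self' {α : Type} {p : List α} {b : Nat} (h : b < p.length) (a d : α) :
    (p.set b a).getD b d = a := by
  rw [List.getD_eq_getElem?_getD, List.getElem?_set_self h]
  rfl

lemma getD_set_ne' {α : Type} {p : List α} {b y : Nat} (h : y ≠ b) (a d : α) :
    (p.set b a).getD y d = p.getD y d := by
  rw [List.getD_eq_getElem?_getD, List.getElem?_set_ne (Ne.symm h), ← List.getD_eq_getElem?_getD]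

lemma findRoot_unfold (p : List Nat) (x : Nat) :
    findRoot p x = if p.getD x x < x then findRoot p (p.getD x x) else x := by
  rw [findRoot]
  split <;> rfl

lemma findRoot_le (p : List Nat) (x : Nat) : findRoot p x ≤ x := by
  induction x using Nat.strong_induction_on with
  | _ x ih =>
    rw [findRoot_unfold]
    split
    · next h => exact le_trans (ih _ h) (le_of_lt h)
    · exact le_refl x

lemma findRoot_root {N : Nat} {p : List Nat} (hOk : parOk N p) (x : Nat) :
    p.getD (findRoot p x) (findRoot p x) = findRoot p x := by
  induction x using Nat.strong_induction_on with
  | _ x ih =>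
    rw [findRoot_unfold]
    split
    · next h => exact ih _ h
    · next h =>
      by_cases hx : x < N
      · have := hOk.2 x hx; omega
      · refine List.getD_eq_default _ _ ?_
        rw [hOk.1]; omega

lemma findRoot_idem {N : Nat} {p : List Nat} (hOk : parOk N p) (x : Nat) :
    findRoot p (findRoot p x) = findRoot p x := by
  conv_lhs => rw [findRoot_unfold]
  rw [findRoot_root hOk x]
  simp

lemma findRoot_set {N : Nat} {p : List Nat} (hOk : parOk N p) {a b : Nat}
    (ha : p.getD a a = a) (hb : p.getD b b = b) (hab : a < b) (hbN : b < p.length)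
    (x : Nat) :
    findRoot (p.set b a) x = if findRoot p x = b then a else findRoot p x := by
  induction x using Nat.strong_induction_on with
  | _ x ih =>
    by_cases hxb : x = b
    · subst hxb
      have hgb : (p.set x a).getD x x = a := getD_set_self' hbN a x
      have hga : (p.set x a).getD a a = a := by
        rw [getD_set_ne' (by omega)]; exact ha
      rw [findRoot_unfold, hgb, if_pos hab, findRoot_unfold, hga, if_neg (lt_irrefl a)]
      have hrb : findRoot p x = x := by
        rw [findRoot_unfold, hb, if_neg (lt_irrefl x)]
      rw [hrb, if_pos rfl]
    · have hg : (p.set b a).getD x x = p.getD x x := getD_set_ne' hxb a x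
      rw [findRoot_unfold, hg]
      by_cases hlt : p.getD x x < x
      · rw [if_pos hlt, ih _ hlt]
        have hfr : findRoot p x = findRoot p (p.getD x x) := by
          conv_lhs => rw [findRoot_unfold]
          rw [if_pos hlt]
        rw [hfr]
      · rw [if_neg hlt]
        have hfr : findRoot p x = x := by
          rw [findRoot_unfold, if_neg hlt]
        rw [hfr, if_neg hxb]

lemma parOk_set {N : Nat} {p : List Nat} (hOk : parOk N p) {a b : Nat}
    (hab : a ≤ b) (hbN : b < N) : parOk N (p.set b a) := by
  refine ⟨by simp [hOk.1], ?_⟩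
  intro y hy
  by_cases hyb : y = b
  · subst hyb
    rw [getD_set_self' (by rw [hOk.1]; exact hbN) a y]
    exact hab
  · rw [getD_set_ne' hyb]
    exact hOk.2 y hy

lemma findRoot_lt_of_lt {p : List Nat} {x N : Nat} (hx : x < N) : findRoot p x < N :=
  lt_of_le_of_lt (findRoot_le p x) hx

lemma findRoot_unionOp {N : Nat} {p : List Nat} (hOk : parOk N p) {a b : Nat}
    (haN : a < N) (hbN : b < N) (x : Nat) :
    findRoot (unionOp p a b) x =
      if findRoot p x = findRoot p a ∨ findRoot p x = findRoot p b
      then min (findRoot p a) (findRoot p b) else findRoot p x := by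
  have hun : unionOp p a b = if findRoot p a = findRoot p b then p
      else if findRoot p a < findRoot p b then p.set (findRoot p b) (findRoot p a)
      else p.set (findRoot p a) (findRoot p b) := rfl
  rw [hun]
  by_cases he : findRoot p a = findRoot p b
  · rw [if_pos he]
    by_cases hx : findRoot p x = findRoot p a ∨ findRoot p x = findRoot p b
    · rw [if_pos hx, ← he, min_self]
      rcases hx with h | h
      · exact h
      · rw [h, he]
    · rw [if_neg hx]
  · rw [if_neg he]
    by_cases hlt : findRoot p a < findRoot p b
    · rw [if_pos hlt]
      rw [findRoot_set hOk (findRoot_root hOk a) (findRoot_root hOk b) hlt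
        (by rw [hOk.1]; exact findRoot_lt_of_lt hbN) x]
      by_cases h1 : findRoot p x = findRoot p b
      · rw [if_pos h1, if_pos (Or.inr h1), min_eq_left (le_of_lt hlt)]
      · rw [if_neg h1]
        by_cases h2 : findRoot p x = findRoot p a
        · rw [if_pos (Or.inl h2), min_eq_left (le_of_lt hlt), h2]
        · rw [if_neg (by tauto)]
    · have hgt : findRoot p b < findRoot p a := by omega
      rw [if_neg hlt]
      rw [findRoot_set hOk (findRoot_root hOk b) (findRoot_root hOk a) hgt
        (by rw [hOk.1]; exact findRoot_lt_of_lt haN) x]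
      by_cases h1 : findRoot p x = findRoot p a
      · rw [if_pos h1, if_pos (Or.inl h1), min_eq_right (le_of_lt hgt)]
      · rw [if_neg h1]
        by_cases h2 : findRoot p x = findRoot p b
        · rw [if_pos (Or.inr h2), min_eq_right (le_of_lt hgt), h2]
        · rw [if_neg (by tauto)]

lemma unionOp_parOk {N : Nat} {p : List Nat} (hOk : parOk N p) {a b : Nat}
    (haN : a < N) (hbN : b < N) : parOk N (unionOp p a b) := by
  have hun : unionOp p a b = if findRoot p a = findRoot p b then p
      else if findRoot p a < findRoot p b then p.set (findRoot p b) (findRoot p a)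
      else p.set (findRoot p a) (findRoot p b) := rfl
  rw [hun]
  split
  · exact hOk
  · split
    · next h => exact parOk_set hOk (le_of_lt h) (findRoot_lt_of_lt hbN)
    · next h => exact parOk_set hOk (by omega) (findRoot_lt_of_lt haN)

lemma findRoot_range (N x : Nat) : findRoot (List.range N) x = x := by
  rw [findRoot_unfold]
  have h : (List.range N).getD x x = x := by
    rcases Nat.lt_or_ge x N with hx | hx
    · rw [List.getD_eq_getElem?_getD, List.getElem?_range hx]; rfl
    · exact List.getD_eq_default _ _ (by simpa)
  rw [h, if_neg (lt_irrefl x)]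

lemma parOk_range (N : Nat) : parOk N (List.range N) := by
  refine ⟨by simp, ?_⟩
  intro y hy
  rw [List.getD_eq_getElem?_getD, List.getElem?_range hy]
  simp

--------------------------------------------------------------------------------
-- B's union pass: after all unions, findRoot is the least cell of the component
--------------------------------------------------------------------------------

def stepU (g : List (List Int)) (n : Nat) (p : List Nat) (x : Nat) : List Nat :=
  if 0 < cellv g (x / n) (x % n) then
    if x % n + 1 < n ∧ 0 < cellv g (x / n) (x % n + 1) then
      unionOp (if x / n + 1 < g.length ∧ 0 < cellv g (x / n + 1) (x % n) then
          unionOp p (x / n * n + x % n) ((x / n + 1) * n + x % n) else p)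
        (x / n * n + x % n) (x / n * n + x % n + 1)
    else
      if x / n + 1 < g.length ∧ 0 < cellv g (x / n + 1) (x % n) then
        unionOp p (x / n * n + x % n) ((x / n + 1) * n + x % n) else p
  else p

structure UFInv (g : List (List Int)) (n : Nat) (p : List Nat) : Prop where
  ok : parOk (g.length * n) p
  sound : ∀ x y, x < g.length * n → y < g.length * n →
    findRoot p x = findRoot p y → connC g n x y

def linked (g : List (List Int)) (n : Nat) (p : List Nat) (x : Nat) : Prop :=
  0 < cellv g (x / n) (x % n) →
    ((x / n + 1 < g.length ∧ 0 < cellv g (x / n + 1) (x % n)) →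
      findRoot p (x / n * n + x % n) = findRoot p ((x / n + 1) * n + x % n)) ∧
    ((x % n + 1 < n ∧ 0 < cellv g (x / n) (x % n + 1)) →
      findRoot p (x / n * n + x % n) = findRoot p (x / n * n + x % n + 1))

lemma unionOp_preserve {N : Nat} {p : List Nat} (hOk : parOk N p) {a b : Nat}
    (haN : a < N) (hbN : b < N) {x y : Nat} (h : findRoot p x = findRoot p y) :
    findRoot (unionOp p a b) x = findRoot (unionOp p a b) y := by
  rw [findRoot_unionOp hOk haN hbN, findRoot_unionOp hOk haN hbN, h]

lemma unionOp_join {N : Nat} {p : List Nat} (hOk : parOk N p) {a b : Nat}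
    (haN : a < N) (hbN : b < N) :
    findRoot (unionOp p a b) a = findRoot (unionOp p a b) b := by
  rw [findRoot_unionOp hOk haN hbN, findRoot_unionOp hOk haN hbN,
    if_pos (Or.inl rfl), if_pos (Or.inr rfl)]

lemma UFInv_union {g : List (List Int)} {n : Nat} {p : List Nat} (h : UFInv g n p)
    {a b : Nat} (hedge : edgeC g n a b) (haN : a < g.length * n) (hbN : b < g.length * n) :
    UFInv g n (unionOp p a b) := by
  refine ⟨unionOp_parOk h.ok haN hbN, ?_⟩
  intro x y hx hy hr
  rw [findRoot_unionOp h.ok haN hbN, findRoot_unionOp h.ok haN hbN] at hr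
  have hconnab : connC g n a b := Relation.ReflTransGen.single hedge
  by_cases hcx : findRoot p x = findRoot p a ∨ findRoot p x = findRoot p b
  · by_cases hcy : findRoot p y = findRoot p a ∨ findRoot p y = findRoot p b
    · have hxab : connC g n x b := by
        rcases hcx with h' | h'
        · exact Relation.ReflTransGen.trans (h.sound x a hx haN h') hconnab
        · exact h.sound x b hx hbN h'
      have hyab : connC g n y b := by
        rcases hcy with h' | h'
        · exact Relation.ReflTransGen.trans (h.sound y a hy haN h') hconnab
        · exact h.sound y b hy hbN h'
      exact Relation.ReflTransGen.trans hxab (connC_symm hyab)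
    · rw [if_pos hcx, if_neg hcy] at hr
      exfalso
      rcases min_cases (findRoot p a) (findRoot p b) with ⟨hm, _⟩ | ⟨hm, _⟩
      · exact hcy (Or.inl (by rw [← hr, hm]))
      · exact hcy (Or.inr (by rw [← hr, hm]))
  · by_cases hcy : findRoot p y = findRoot p a ∨ findRoot p y = findRoot p b
    · rw [if_neg hcx, if_pos hcy] at hr
      exfalso
      rcases min_cases (findRoot p a) (findRoot p b) with ⟨hm, _⟩ | ⟨hm, _⟩
      · exact hcx (Or.inl (by rw [hr, hm]))
      · exact hcx (Or.inr (by rw [hr, hm]))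
    · rw [if_neg hcx, if_neg hcy] at hr
      exact h.sound x y hx hy hr

lemma enc_down (x n : Nat) : (x / n + 1) * n + x % n = x + n := by
  rw [add_mul, one_mul, add_right_comm, dec_eq]

lemma unionFold_inv (g : List (List Int)) (n : Nat) (hn : 0 < n) :
    ∀ t, t ≤ g.length * n →
      UFInv g n ((List.range t).foldl (stepU g n) (List.range (g.length * n))) ∧
      ∀ x < t, linked g n ((List.range t).foldl (stepU g n) (List.range (g.length * n))) x := by
  intro t
  induction t with
  | zero =>
    intro _
    simp only [List.range_zero, List.foldl_nil]
    refine ⟨⟨parOk_range _, ?_⟩, by omega⟩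
    intro x y _ _ hr
    rw [findRoot_range, findRoot_range] at hr
    exact hr ▸ Relation.ReflTransGen.refl
  | succ t ih =>
    intro ht
    have ht' : t < g.length * n := by omega
    obtain ⟨hUF, hlink⟩ := ih (le_of_lt ht')
    rw [List.range_succ, List.foldl_append, List.foldl_cons, List.foldl_nil]
    set p := (List.range t).foldl (stepU g n) (List.range (g.length * n)) with hp
    have hi : t / n < g.length := dec_div_lt ht'
    have hj : t % n < n := Nat.mod_lt _ hn
    have henc : t / n * n + t % n = t := dec_eq t n
    by_cases hcv : 0 < cellv g (t / n) (t % n)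
    · have hpos : posC g n t := ⟨ht', by rw [valv]; exact hcv⟩
      -- the two candidate unions
      by_cases hd : t / n + 1 < g.length ∧ 0 < cellv g (t / n + 1) (t % n)
      case pos =>
        have hposd : posC g n (t + n) := by
          rw [← enc_down t n]
          exact (posC_enc_iff hd.1 hj).mpr hd.2
        have hedge : edgeC g n t (t + n) := by
          refine ⟨hpos, hposd, t / n, t % n, t / n + 1, t % n, hj, hj, henc.symm,
            (enc_down t n).symm, Or.inr ⟨rfl, Or.inl rfl⟩⟩
        have htN : t < g.length * n := ht'
        have htnN : t + n < g.length * n := by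
          rw [← enc_down t n]
          exact enc_lt hd.1 hj
        have hUF1 : UFInv g n (unionOp p t (t + n)) := UFInv_union hUF hedge htN htnN
        have hlink1 : ∀ x < t, linked g n (unionOp p t (t + n)) x := by
          intro x hx hcv'
          obtain ⟨h1, h2⟩ := hlink x hx hcv'
          exact ⟨fun hc => unionOp_preserve hUF.ok htN htnN (h1 hc),
            fun hc => unionOp_preserve hUF.ok htN htnN (h2 hc)⟩
        have hjoin1 : findRoot (unionOp p t (t + n)) t = findRoot (unionOp p t (t + n)) (t + n) :=
          unionOp_join hUF.ok htN htnN
        by_cases hr : t % n + 1 < n ∧ 0 < cellv g (t / n) (t % n + 1)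
        case pos =>
          have hstep : stepU g n p t = unionOp (unionOp p (t / n * n + t % n)
              ((t / n + 1) * n + t % n)) (t / n * n + t % n) (t / n * n + t % n + 1) := by
            rw [stepU, if_pos hcv, if_pos hr, if_pos hd]
          rw [hstep]
          rw [henc, enc_down]
          have hposr : posC g n (t + 1) := by
            have : t / n * n + (t % n + 1) = t + 1 := by omega
            rw [← this]
            exact (posC_enc_iff hi hr.1).mpr hr.2
          have hedge2 : edgeC g n t (t + 1) := by
            refine ⟨hpos, hposr, t / n, t % n, t / n, t % n + 1, hj, hr.1, henc.symm,
              by omega, Or.inl ⟨rfl, Or.inl rfl⟩⟩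
          have ht1N : t + 1 < g.length * n := by
            have : t / n * n + (t % n + 1) = t + 1 := by omega
            rw [← this]
            exact enc_lt hi hr.1
          have hUF2 : UFInv g n (unionOp (unionOp p t (t + n)) t (t + 1)) :=
            UFInv_union hUF1 hedge2 htN ht1N
          refine ⟨hUF2, ?_⟩
          intro x hx
          rcases Nat.lt_succ_iff_lt_or_eq.mp hx with hx' | rfl
          · intro hcv'
            obtain ⟨h1, h2⟩ := hlink1 x hx' hcv'
            exact ⟨fun hc => unionOp_preserve hUF1.ok htN ht1N (h1 hc),
              fun hc => unionOp_preserve hUF1.ok htN ht1N (h2 hc)⟩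
          · intro _
            constructor
            · intro _
              rw [henc, enc_down]
              exact unionOp_preserve hUF1.ok htN ht1N hjoin1
            · intro _
              rw [henc]
              exact unionOp_join hUF1.ok htN ht1N
        case neg =>
          have hstep : stepU g n p t = unionOp p (t / n * n + t % n)
              ((t / n + 1) * n + t % n) := by
            rw [stepU, if_pos hcv, if_neg hr, if_pos hd]
          rw [hstep, henc, enc_down]
          refine ⟨hUF1, ?_⟩
          intro x hx
          rcases Nat.lt_succ_iff_lt_or_eq.mp hx with hx' | rfl
          · exact hlink1 x hx'
          · intro _
            constructor
            · intro _
              rw [henc, enc_down]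
              exact hjoin1
            · intro hc
              exact absurd hc hr
      case neg =>
        by_cases hr : t % n + 1 < n ∧ 0 < cellv g (t / n) (t % n + 1)
        case pos =>
          have hstep : stepU g n p t = unionOp p (t / n * n + t % n)
              (t / n * n + t % n + 1) := by
            rw [stepU, if_pos hcv, if_pos hr, if_neg hd]
          rw [hstep, henc]
          have hposr : posC g n (t + 1) := by
            have he1 : t / n * n + (t % n + 1) = t + 1 := by omega
            rw [← he1]
            exact (posC_enc_iff hi hr.1).mpr hr.2
          have hedge2 : edgeC g n t (t + 1) := by
            refine ⟨hpos, hposr, t / n, t % n, t / n, t % n + 1, hj, hr.1, henc.symm,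
              by omega, Or.inl ⟨rfl, Or.inl rfl⟩⟩
          have ht1N : t + 1 < g.length * n := by
            have he1 : t / n * n + (t % n + 1) = t + 1 := by omega
            rw [← he1]
            exact enc_lt hi hr.1
          have hUF2 : UFInv g n (unionOp p t (t + 1)) := UFInv_union hUF hedge2 ht' ht1N
          refine ⟨hUF2, ?_⟩
          intro x hx
          rcases Nat.lt_succ_iff_lt_or_eq.mp hx with hx' | rfl
          · intro hcv'
            obtain ⟨h1, h2⟩ := hlink x hx' hcv'
            exact ⟨fun hc => unionOp_preserve hUF.ok ht' ht1N (h1 hc),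
              fun hc => unionOp_preserve hUF.ok ht' ht1N (h2 hc)⟩
          · intro _
            refine ⟨fun hc => absurd hc hd, fun _ => ?_⟩
            rw [henc]
            exact unionOp_join hUF.ok ht' ht1N
        case neg =>
          have hstep : stepU g n p t = p := by
            rw [stepU, if_pos hcv, if_neg hr, if_neg hd]
          rw [hstep]
          refine ⟨hUF, ?_⟩
          intro x hx
          rcases Nat.lt_succ_iff_lt_or_eq.mp hx with hx' | rfl
          · exact hlink x hx'
          · exact fun _ => ⟨fun hc => absurd hc hd, fun hc => absurd hc hr⟩
    · have hstep : stepU g n p t = p := by rw [stepU, if_neg hcv]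
      rw [hstep]
      refine ⟨hUF, ?_⟩
      intro x hx
      rcases Nat.lt_succ_iff_lt_or_eq.mp hx with hx' | rfl
      · exact hlink x hx'
      · exact fun hc => absurd hc hcv

lemma edge_root {g : List (List Int)} {n : Nat} {pf : List Nat} (hn : 0 < n)
    (hUF : UFInv g n pf) (hlink : ∀ x < g.length * n, linked g n pf x)
    {x y : Nat} (he : edgeC g n x y) : findRoot pf x = findRoot pf y := by
  obtain ⟨hx, hy, r, c, r', c', hc, hc', hxe, hye, hadj⟩ := he
  have hcvx : 0 < cellv g r c := by
    have := hx.2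
    rw [hxe, valv_enc hc] at this
    exact this
  have hcvy : 0 < cellv g r' c' := by
    have := hy.2
    rw [hye, valv_enc hc'] at this
    exact this
  have hrm : r < g.length := by
    have := hx.1
    rw [hxe] at this
    have h2 := enc_div (r := r) hc
    rw [← h2]
    exact dec_div_lt this
  have hrm' : r' < g.length := by
    have := hy.1
    rw [hye] at this
    have h2 := enc_div (r := r') hc'
    rw [← h2]
    exact dec_div_lt this
  rcases hadj with ⟨hre, hcs⟩ | ⟨hce, hrs⟩
  · subst hre
    rcases hcs with h | h
    · -- y is right of x
      have hlx := hlink (r * n + c) (by rw [← hxe]; exact hx.1)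
      unfold linked at hlx
      rw [enc_div hc, enc_mod hc] at hlx
      have := (hlx hcvx).2 ⟨by omega, by rw [← h] at hcvy; exact hcvy⟩
      rw [hxe, hye, ← h]
      have he2 : r * n + (c + 1) = r * n + c + 1 := by omega
      rw [he2]
      exact this
    · -- x is right of y
      have hly := hlink (r * n + c') (by rw [← hye]; exact hy.1)
      unfold linked at hly
      rw [enc_div hc', enc_mod hc'] at hly
      have := (hly hcvy).2 ⟨by omega, by rw [← h] at hcvx; exact hcvx⟩
      rw [hxe, hye, ← h]
      have he2 : r * n + (c' + 1) = r * n + c' + 1 := by omega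
      rw [he2]
      exact this.symm
  · subst hce
    rcases hrs with h | h
    · -- y is below x
      have hlx := hlink (r * n + c) (by rw [← hxe]; exact hx.1)
      unfold linked at hlx
      rw [enc_div hc, enc_mod hc] at hlx
      have := (hlx hcvx).1 ⟨by omega, by rw [← h] at hcvy; exact hcvy⟩
      rw [hxe, hye, ← h]
      exact this
    · -- x is below y
      have hly := hlink (r' * n + c) (by rw [← hye]; exact hy.1)
      unfold linked at hly
      rw [enc_div hc, enc_mod hc] at hly
      have := (hly hcvy).1 ⟨by omega, by rw [← h] at hcvx; exact hcvx⟩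
      rw [hxe, hye, ← h]
      exact this.symm

lemma conn_root {g : List (List Int)} {n : Nat} {pf : List Nat} (hn : 0 < n)
    (hUF : UFInv g n pf) (hlink : ∀ x < g.length * n, linked g n pf x)
    {x y : Nat} (hconn : connC g n x y) : findRoot pf x = findRoot pf y := by
  induction hconn with
  | refl => rfl
  | @tail b w hab hbc ih => exact ih.trans (edge_root hn hUF hlink hbc)

lemma root_eq_minCl {g : List (List Int)} {n : Nat} {pf : List Nat} (hn : 0 < n)
    (hUF : UFInv g n pf) (hlink : ∀ x < g.length * n, linked g n pf x)
    {x : Nat} (hx : posC g n x) : findRoot pf x = minCl g n x := by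
  have hxN : x < g.length * n := hx.1
  have hrN : findRoot pf x < g.length * n := findRoot_lt_of_lt hxN
  have hconnr : connC g n x (findRoot pf x) := by
    apply hUF.sound x (findRoot pf x) hxN hrN
    exact (findRoot_idem hUF.ok x).symm
  symm
  apply minCl_eq_of
  · exact mem_classF.mpr ⟨hrN, hconnr⟩
  · intro y hy
    obtain ⟨hyN, hconny⟩ := mem_classF.mp hy
    rw [conn_root hn hUF hlink hconny]
    exact findRoot_le pf y

--------------------------------------------------------------------------------
-- B's tally pass and the final sum
--------------------------------------------------------------------------------

def stepT (g : List (List Int)) (n : Nat) (pf : List Nat) (b : List Int) (x : Nat) :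
    List Int :=
  if 0 < cellv g (x / n) (x % n) then
    b.set (findRoot pf (x / n * n + x % n))
      (max (b.getD (findRoot pf (x / n * n + x % n)) 0) (cellv g (x / n) (x % n)))
  else b

noncomputable def Mt (g : List (List Int)) (n : Nat) (pf : List Nat) (t k : Nat) : Int :=
  WithBot.unbotD 0 (((@Finset.filter _ (fun y => posC g n y ∧ findRoot pf y = k)
    (Classical.decPred _) (Finset.range t)).image (valv g n)).max)

lemma unbotD_sup_coe (a : Int) (h : 0 ≤ a) (o : WithBot Int) :
    WithBot.unbotD 0 ((a : WithBot Int) ⊔ o) = max a (WithBot.unbotD 0 o) := by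
  cases o with
  | bot => simpa using (max_eq_left h).symm
  | coe b => rfl

lemma getD_replicate_zero (N k : Nat) : (List.replicate N (0 : Int)).getD k 0 = 0 := by
  rcases Nat.lt_or_ge k N with h | h
  · rw [List.getD_eq_getElem?_getD]
    simp [List.getElem?_replicate, h]
  · exact List.getD_eq_default _ _ (by simpa)

lemma tallyFold_inv (g : List (List Int)) (n : Nat) (hn : 0 < n) (pf : List Nat) :
    ∀ t, t ≤ g.length * n →
      ((List.range t).foldl (stepT g n pf)
        (List.replicate (g.length * n) (0 : Int))).length = g.length * n ∧
      ∀ k, ((List.range t).foldl (stepT g n pf)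
        (List.replicate (g.length * n) (0 : Int))).getD k 0 = Mt g n pf t k := by
  intro t
  induction t with
  | zero =>
    intro _
    simp only [List.range_zero, List.foldl_nil]
    refine ⟨by simp, ?_⟩
    intro k
    rw [getD_replicate_zero]
    simp [Mt]
  | succ t ih =>
    intro ht
    have ht' : t < g.length * n := by omega
    obtain ⟨hlen, hgetD⟩ := ih (le_of_lt ht')
    rw [List.range_succ, List.foldl_append, List.foldl_cons, List.foldl_nil]
    have hi : t / n < g.length := dec_div_lt ht'
    have hj : t % n < n := Nat.mod_lt _ hn
    have henc : t / n * n + t % n = t := dec_eq t n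
    by_cases hcv : 0 < cellv g (t / n) (t % n)
    · have hpos : posC g n t := ⟨ht', by rw [valv]; exact hcv⟩
      have hstep : stepT g n pf
          ((List.range t).foldl (stepT g n pf) (List.replicate (g.length * n) (0 : Int))) t =
          ((List.range t).foldl (stepT g n pf) (List.replicate (g.length * n) (0 : Int))).set
            (findRoot pf t)
            (max (((List.range t).foldl (stepT g n pf)
              (List.replicate (g.length * n) (0 : Int))).getD (findRoot pf t) 0)
              (cellv g (t / n) (t % n))) := by
        rw [stepT, if_pos hcv, henc]
      rw [hstep]
      have hrtN : findRoot pf t < g.length * n := findRoot_lt_of_lt ht'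
      refine ⟨by simpa using hlen, ?_⟩
      intro k
      by_cases hk : k = findRoot pf t
      · subst hk
        rw [getD_set_self' (by rw [hlen]; exact hrtN)]
        rw [hgetD]
        rw [Mt, Mt, Finset.range_add_one, Finset.filter_insert,
          if_pos ⟨hpos, rfl⟩, Finset.image_insert, Finset.max_insert]
        rw [unbotD_sup_coe (valv g n t) (le_of_lt hpos.2)]
        rw [valv]
        exact (max_comm _ _)
      · rw [getD_set_ne' hk]
        rw [hgetD]
        rw [Mt, Mt, Finset.range_add_one, Finset.filter_insert,
          if_neg (by rintro ⟨_, h⟩; exact hk h.symm)]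
    · have hstep : stepT g n pf
          ((List.range t).foldl (stepT g n pf) (List.replicate (g.length * n) (0 : Int))) t =
          (List.range t).foldl (stepT g n pf) (List.replicate (g.length * n) (0 : Int)) := by
        rw [stepT, if_neg hcv]
      rw [hstep]
      refine ⟨hlen, ?_⟩
      intro k
      rw [hgetD]
      rw [Mt, Mt, Finset.range_add_one, Finset.filter_insert,
        if_neg (by rintro ⟨hp, _⟩; exact hcv hp.2)]

lemma sum_getD (l : List Int) : l.sum = ∑ k ∈ Finset.range l.length, l.getD k 0 := by
  induction l with
  | nil => simp
  | cons a tl ih =>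
    rw [List.sum_cons, List.length_cons, Finset.sum_range_succ']
    simp only [List.getD_cons_succ, List.getD_cons_zero]
    rw [ih]
    ring

lemma Mt_final {g : List (List Int)} {n : Nat} {pf : List Nat} (hn : 0 < n)
    (hUF : UFInv g n pf) (hlink : ∀ x < g.length * n, linked g n pf x) :
    ∑ k ∈ Finset.range (g.length * n), Mt g n pf (g.length * n) k = specSum g n := by
  rw [specSum, Finset.sum_filter]
  apply Finset.sum_congr rfl
  intro k hk
  rw [Finset.mem_range] at hk
  by_cases hpred : posC g n k ∧ minCl g n k = k
  · rw [if_pos hpred]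
    have hfilter : @Finset.filter _ (fun y => posC g n y ∧ findRoot pf y = k)
        (Classical.decPred _) (Finset.range (g.length * n)) = classF g n k := by
      ext y
      simp only [Finset.mem_filter, Finset.mem_range, mem_classF]
      constructor
      · rintro ⟨hyN, hyp, hroot⟩
        have := root_eq_minCl hn hUF hlink hyp
        rw [this] at hroot
        have hkm : k ∈ classF g n y := hroot ▸ minCl_mem hyp
        exact ⟨hyN, connC_symm (mem_classF.mp hkm).2⟩
      · rintro ⟨hyN, hconn⟩
        have hyp : posC g n y := posC_of_connC hpred.1 hconn
        refine ⟨hyN, hyp, ?_⟩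
        rw [conn_root hn hUF hlink (connC_symm hconn), root_eq_minCl hn hUF hlink hpred.1,
          hpred.2]
    rw [Mt, hfilter]
    rfl
  · rw [if_neg hpred]
    have hfilter : @Finset.filter _ (fun y => posC g n y ∧ findRoot pf y = k)
        (Classical.decPred _) (Finset.range (g.length * n)) = ∅ := by
      rw [Finset.eq_empty_iff_forall_notMem]
      intro y
      simp only [Finset.mem_filter, Finset.mem_range]
      rintro ⟨hyN, hyp, hroot⟩
      have hr := root_eq_minCl hn hUF hlink hyp
      rw [hr] at hroot
      have hkm : k ∈ classF g n y := hroot ▸ minCl_mem hyp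
      obtain ⟨_, hconn⟩ := mem_classF.mp hkm
      have hkp : posC g n k := posC_of_connC hyp hconn
      have : minCl g n k = k := by
        rw [← minCl_congr hyp hconn, hroot]
      exact hpred ⟨hkp, this⟩
    rw [Mt, hfilter]
    simp

lemma B_eq (g : List (List Int)) (hm : 0 < g.length) (hn : 0 < (g.headD []).length) :
    sum_of_islands_max_alt g = specSum g (g.headD []).length := by
  have hguard : ¬ ((g.isEmpty || (g.headD []).isEmpty) = true) := by
    simp only [Bool.or_eq_true, List.isEmpty_iff, not_or]
    constructor
    · intro h; rw [h] at hm; simp at hm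
    · intro h; rw [h] at hn; simp at hn
  rw [sum_of_islands_max_alt, if_neg hguard]
  show ((List.range g.length).foldl (fun b r =>
      (List.range (g.headD []).length).foldl (fun (b : List Int) c =>
        if 0 < cellv g r c then
          b.set (findRoot ((List.range g.length).foldl (fun p r =>
              (List.range (g.headD []).length).foldl (fun (p : List Nat) c =>
                if 0 < cellv g r c then
                  if c + 1 < (g.headD []).length ∧ 0 < cellv g r (c + 1) then
                    unionOp (if r + 1 < g.length ∧ 0 < cellv g (r + 1) c then
                        unionOp p (r * (g.headD []).length + c)
                          ((r + 1) * (g.headD []).length + c) else p)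
                      (r * (g.headD []).length + c) (r * (g.headD []).length + c + 1)
                  else if r + 1 < g.length ∧ 0 < cellv g (r + 1) c then
                    unionOp p (r * (g.headD []).length + c)
                      ((r + 1) * (g.headD []).length + c) else p
                else p) p)
              (List.range (g.length * (g.headD []).length)))
            (r * (g.headD []).length + c))
            (max (b.getD (findRoot ((List.range g.length).foldl (fun p r =>
              (List.range (g.headD []).length).foldl (fun (p : List Nat) c =>
                if 0 < cellv g r c then
                  if c + 1 < (g.headD []).length ∧ 0 < cellv g r (c + 1) then
                    unionOp (if r + 1 < g.length ∧ 0 < cellv g (r + 1) c then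
                        unionOp p (r * (g.headD []).length + c)
                          ((r + 1) * (g.headD []).length + c) else p)
                      (r * (g.headD []).length + c) (r * (g.headD []).length + c + 1)
                  else if r + 1 < g.length ∧ 0 < cellv g (r + 1) c then
                    unionOp p (r * (g.headD []).length + c)
                      ((r + 1) * (g.headD []).length + c) else p
                else p) p)
              (List.range (g.length * (g.headD []).length)))
            (r * (g.headD []).length + c)) 0) (cellv g r c))
        else b) b)
    (List.replicate (g.length * (g.headD []).length) (0 : Int))).sum
      = specSum g (g.headD []).length
  have hpar : ((List.range g.length).foldl (fun p r =>
      (List.range (g.headD []).length).foldl (fun (p : List Nat) c =>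
        if 0 < cellv g r c then
          if c + 1 < (g.headD []).length ∧ 0 < cellv g r (c + 1) then
            unionOp (if r + 1 < g.length ∧ 0 < cellv g (r + 1) c then
                unionOp p (r * (g.headD []).length + c)
                  ((r + 1) * (g.headD []).length + c) else p)
              (r * (g.headD []).length + c) (r * (g.headD []).length + c + 1)
          else if r + 1 < g.length ∧ 0 < cellv g (r + 1) c then
            unionOp p (r * (g.headD []).length + c)
              ((r + 1) * (g.headD []).length + c) else p
        else p) p)
      (List.range (g.length * (g.headD []).length))) =
      (List.range (g.length * (g.headD []).length)).foldl (stepU g ((g.headD []).length))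
        (List.range (g.length * (g.headD []).length)) :=
    foldl_range_mul g.length ((g.headD []).length) _ _
  rw [hpar]
  obtain ⟨hUF, hlink⟩ := unionFold_inv g ((g.headD []).length) hn
    (g.length * (g.headD []).length) (le_refl _)
  have htal : ((List.range g.length).foldl (fun b r =>
      (List.range (g.headD []).length).foldl (fun (b : List Int) c =>
        if 0 < cellv g r c then
          b.set (findRoot ((List.range (g.length * (g.headD []).length)).foldl
              (stepU g ((g.headD []).length))
              (List.range (g.length * (g.headD []).length)))
            (r * (g.headD []).length + c))
            (max (b.getD (findRoot ((List.range (g.length * (g.headD []).length)).foldl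
              (stepU g ((g.headD []).length))
              (List.range (g.length * (g.headD []).length)))
            (r * (g.headD []).length + c)) 0) (cellv g r c))
        else b) b)
    (List.replicate (g.length * (g.headD []).length) (0 : Int))) =
      (List.range (g.length * (g.headD []).length)).foldl
        (stepT g ((g.headD []).length) ((List.range (g.length * (g.headD []).length)).foldl
          (stepU g ((g.headD []).length)) (List.range (g.length * (g.headD []).length))))
        (List.replicate (g.length * (g.headD []).length) (0 : Int)) :=
    foldl_range_mul g.length ((g.headD []).length) _ _
  rw [htal]
  obtain ⟨hlen, hgetD⟩ := tallyFold_inv g ((g.headD []).length) hn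
    ((List.range (g.length * (g.headD []).length)).foldl (stepU g ((g.headD []).length))
      (List.range (g.length * (g.headD []).length)))
    (g.length * (g.headD []).length) (le_refl _)
  rw [sum_getD, hlen]
  rw [Finset.sum_congr rfl (fun k _ => hgetD k)]
  exact Mt_final hn hUF hlink

-- ===== VERDICT (by name: the statement is the Claim_ definition above) =====
theorem sum_of_islands_max_spec : Claim_equal_sum_of_islands_max := by
  intro grid _ _
  unfold Spec_sum_of_islands_max
  by_cases h0 : (grid.isEmpty || (grid.headD []).isEmpty) = true
  · rw [sum_of_islands_max, sum_of_islands_max_alt, if_pos h0, if_pos h0]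
  · simp only [Bool.or_eq_true, List.isEmpty_iff, not_or] at h0
    have hm : 0 < grid.length := by
      cases grid with
      | nil => exact absurd rfl h0.1
      | cons a l => simp
    have hn : 0 < (grid.headD []).length := by
      cases hh : grid.headD [] with
      | nil => exact absurd hh h0.2
      | cons a l => simp
    rw [A_eq grid hm hn, B_eq grid hm hn]
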